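-- pv_equiv track=rewrite | github.com/KMORaza/leetcode-solutions | LeetCode Solutions/1946.py | maximumNumber
-- ===== SOURCE A (Python) =====
-- from typing import List
--
-- def maximumNumber(num: str, change: List[int]) -> str:
--     num_list = list(num)
--     made_change = False
--     for i in range(len(num_list)):
--         digit = int(num_list[i])
--         if change[digit] > digit:
--             num_list[i] = str(change[digit])
--             made_change = True
--         elif made_change:
--             if change[digit] < digit:
--                 break
--     return ''.join(num_list)
-- ===== SOURCE B (Python) =====
-- from typing import List
--
-- def maximumNumber(num: str, change: List[int]) -> str:
--     cs = list(num)
--     k = 0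
--     while k < len(cs) and change[int(cs[k])] <= int(cs[k]):
--         k += 1
--     prefix, rest = cs[:k], cs[k:]
--     seg = []
--     while rest and change[int(rest[0])] >= int(rest[0]):
--         d = int(rest[0])
--         seg.append(str(change[d]) if change[d] > d else rest[0])
--         rest = rest[1:]
--     return ''.join(prefix + seg + rest)
-- ===== Notes on version B (the rewrite author's own statement) =====
-- stated objective: alternative
-- what changed: Replaces the single flag-controlled loop with a two-phase decomposition: first find the prefix where no digit improves, then map the maximal non-decreasing segment, keeping the rest untouched; no boolean flag, no in-place mutation.
-- outside the precondition, e.g. on maximumNumber('019', [9, 0]): A returns '919', B returns '919'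
import Mathlib
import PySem

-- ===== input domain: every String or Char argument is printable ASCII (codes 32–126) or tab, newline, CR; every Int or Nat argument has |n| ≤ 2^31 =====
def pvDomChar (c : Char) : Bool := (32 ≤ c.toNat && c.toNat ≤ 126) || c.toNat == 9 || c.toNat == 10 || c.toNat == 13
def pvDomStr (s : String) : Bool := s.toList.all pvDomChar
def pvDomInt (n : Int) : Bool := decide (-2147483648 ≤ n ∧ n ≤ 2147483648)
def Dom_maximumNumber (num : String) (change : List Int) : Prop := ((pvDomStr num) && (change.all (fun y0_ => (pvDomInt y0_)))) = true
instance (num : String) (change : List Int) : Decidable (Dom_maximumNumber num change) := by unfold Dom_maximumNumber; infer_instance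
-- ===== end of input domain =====

-- B replaces A's flag-controlled single loop by a skip-prefix / map-segment decomposition (same cost; return value only, A mutates only its local list).

-- shared primitive helpers: int(c) and change[d] (Pre_ guarantees both succeed; getD 0 is never the Python value inside Pre_)
def pvDig (c : Char) : Int := (PySem.Int.ofStr? (String.mk [c])).getD 0
def pvChg (change : List Int) (d : Int) : Int := (PySem.List.pyGet? change d).getD 0

-- ===== PORT A =====
-- A's for-loop with `made_change` flag and break; the list of (possibly multi-char) strings is joined at the end
def pvGoA (change : List Int) (made : Bool) : List Char → List String
  | [] => []
  | c :: rest =>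
    let d := pvDig c
    let cd := pvChg change d
    if cd > d then PySem.Int.toStr cd :: pvGoA change true rest
    else if made ∧ cd < d then String.mk [c] :: rest.map (fun x => String.mk [x])  -- break: rest unchanged
    else String.mk [c] :: pvGoA change made rest

def maximumNumber (num : String) (change : List Int) : String :=
  PySem.Str.join "" (pvGoA change false num.toList)

-- ===== PORT B =====
-- first while-loop of Source B: split off the prefix where change[d] <= d
def pvSkip (change : List Int) : List Char → List Char × List Char
  | [] => ([], [])
  | c :: rest =>
    if pvChg change (pvDig c) ≤ pvDig c then
      let p := pvSkip change rest
      (c :: p.1, p.2)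
    else ([], c :: rest)

-- second while-loop of Source B: consume the segment where change[d] >= d, replacing strict improvements
def pvSeg (change : List Int) : List Char → List String × List Char
  | [] => ([], [])
  | c :: rest =>
    let d := pvDig c
    let cd := pvChg change d
    if cd ≥ d then
      let p := pvSeg change rest
      ((if cd > d then PySem.Int.toStr cd else String.mk [c]) :: p.1, p.2)
    else ([], c :: rest)

def maximumNumber_alt (num : String) (change : List Int) : String :=
  let sp := pvSkip change num.toList
  let sg := pvSeg change sp.2
  PySem.Str.join "" ((sp.1.map fun c => String.mk [c]) ++ sg.1 ++ (sg.2.map fun c => String.mk [c]))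

-- ===== PRECONDITION & SPEC =====
-- Pre_ excludes the inputs where Python's A raises: a non-digit character (ValueError from int) or a digit
-- indexing past len(change) (IndexError). It demands this for EVERY character, so it is slightly narrower
-- than A's domain: A may break before reaching an offending character and still return (see cites).
def Pre_maximumNumber (num : String) (change : List Int) : Prop :=
  (num.toList.all fun c => 48 ≤ c.toNat && c.toNat ≤ 57 && decide ((c.toNat : Int) - 48 < change.length)) = true
instance (num : String) (change : List Int) : Decidable (Pre_maximumNumber num change) := by
  unfold Pre_maximumNumber; infer_instance

def pvWitness_maximumNumber : String × List Int := ("21", [5, 5, 9])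

def Spec_maximumNumber (num : String) (change : List Int) (out : String) : Prop := out = maximumNumber_alt num change
instance (num : String) (change : List Int) (out : String) : Decidable (Spec_maximumNumber num change out) := by unfold Spec_maximumNumber; infer_instance

-- ===== CLAIM (what is proved, stated in full; the proofs are below) =====
def Claim_equal_maximumNumber : Prop := ∀ (num : String) (change : List Int), Dom_maximumNumber num change → Pre_maximumNumber num change → Spec_maximumNumber num change (maximumNumber num change)

-- ===== LEMMAS AND PROOFS =====

-- inside the segment, A (flag already set) produces exactly B's segment followed by the untouched rest
theorem pvGoA_true_eq_seg (change : List Int) (cs : List Char) :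
    pvGoA change true cs = (pvSeg change cs).1 ++ ((pvSeg change cs).2.map fun x => String.mk [x]) := by
  induction cs with
  | nil => simp [pvGoA, pvSeg]
  | cons c rest ih =>
    simp only [pvGoA, pvSeg]
    by_cases h1 : pvChg change (pvDig c) > pvDig c
    · simp [h1, le_of_lt h1, ih]
    · by_cases h2 : pvChg change (pvDig c) < pvDig c
      · simp [h1, h2, not_le.mpr h2]
      · have he : pvChg change (pvDig c) ≥ pvDig c := le_of_not_gt h2
        simp [h1, h2, he, ih]

-- A from the initial (flag clear) state = B's prefix skip followed by A in the flag-set state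
theorem pvGoA_false_eq_skip (change : List Int) (cs : List Char) :
    pvGoA change false cs =
      ((pvSkip change cs).1.map fun x => String.mk [x]) ++ pvGoA change true (pvSkip change cs).2 := by
  induction cs with
  | nil => simp [pvGoA, pvSkip]
  | cons c rest ih =>
    simp only [pvGoA, pvSkip]
    by_cases h1 : pvChg change (pvDig c) ≤ pvDig c
    · simp [not_lt.mpr h1, h1, ih]
    · have hgt : pvChg change (pvDig c) > pvDig c := lt_of_not_ge h1
      simp [hgt, h1, pvGoA]

-- ===== VERDICT (by name: the statement is the Claim_ definition above) =====
theorem maximumNumber_spec : Claim_equal_maximumNumber := by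
  intro num change _ _
  unfold Spec_maximumNumber maximumNumber maximumNumber_alt
  simp only [pvGoA_false_eq_skip, pvGoA_true_eq_seg, List.append_assoc]
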